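-- pv_equiv track=rewrite | github.com/hartes77/attrahere-platform | analysis_core/ml_analyzer/detectors/data_flow_contamination_detector.py | _affects_split_data
-- ===== SOURCE A (Python) =====
-- from typing import Dict, List, Any, Optional, Set, Union
--
-- def _affects_split_data(
--     operation: Dict, split_operations: List[Dict]
-- ) -> bool:
--     """Check if operation affects the same data that gets split"""
--     # Simplified check - in practice would need more sophisticated analysis
--     operation_vars = set(operation.get("source_vars", []))
--
--     for split_op in split_operations:
--         split_vars = set(split_op.get("variables", []))
--         if operation_vars.intersection(split_vars):
--             return True
--
--     return False
-- ===== SOURCE B (Python) =====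
-- def _affects_split_data(operation, split_operations):
--     """Check if operation affects the same data that gets split"""
--     all_split_vars = set()
--     for split_op in split_operations:
--         all_split_vars.update(split_op.get("variables", []))
--     return bool(set(operation.get("source_vars", [])) & all_split_vars)
-- ===== Notes on version B (the rewrite author's own statement) =====
-- stated objective: simpler
-- what changed: A intersects the operation's vars with each split_op's var-set one by one with an early return; B first folds all split_ops into one combined set and does a single intersection at the end, replacing the per-split intersect-and-return with build-an-index-then-one-test.
import Mathlib
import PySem

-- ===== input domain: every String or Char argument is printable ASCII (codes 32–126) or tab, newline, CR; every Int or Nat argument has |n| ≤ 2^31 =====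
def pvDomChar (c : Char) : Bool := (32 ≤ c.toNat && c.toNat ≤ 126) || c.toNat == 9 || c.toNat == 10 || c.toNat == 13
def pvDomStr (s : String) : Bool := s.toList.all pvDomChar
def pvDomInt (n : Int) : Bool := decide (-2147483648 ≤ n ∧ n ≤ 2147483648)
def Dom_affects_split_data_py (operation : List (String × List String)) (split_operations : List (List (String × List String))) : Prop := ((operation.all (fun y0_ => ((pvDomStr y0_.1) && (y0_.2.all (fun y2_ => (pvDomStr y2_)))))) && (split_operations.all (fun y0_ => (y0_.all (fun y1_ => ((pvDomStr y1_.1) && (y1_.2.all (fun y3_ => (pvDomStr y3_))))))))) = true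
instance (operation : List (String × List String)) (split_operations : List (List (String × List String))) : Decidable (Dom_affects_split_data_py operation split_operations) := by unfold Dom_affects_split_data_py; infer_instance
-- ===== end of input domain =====

-- B builds one combined set of all split variables and does a single intersection (simpler decomposition).

-- ===== PORT A =====
-- the 'for split_op in split_operations: … return True' loop of A
def pvLoopA (operation_vars : PySem.Set String) : List (List (String × List String)) → Bool
  | [] => false
  | split_op :: rest =>
    let split_vars : PySem.Set String := PySem.Set.ofList (PySem.Dict.getD (PySem.Dict.mk split_op) "variables" [])
    if PySem.Set.inter operation_vars split_vars ≠ [] then true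
    else pvLoopA operation_vars rest

def affects_split_data_py (operation : List (String × List String)) (split_operations : List (List (String × List String))) : Bool :=
  let operation_vars : PySem.Set String := PySem.Set.ofList (PySem.Dict.getD (PySem.Dict.mk operation) "source_vars" [])
  pvLoopA operation_vars split_operations

-- ===== PORT B =====
def affects_split_data_py_alt (operation : List (String × List String)) (split_operations : List (List (String × List String))) : Bool :=
  let all_split_vars : PySem.Set String :=
    split_operations.foldl (fun s split_op => PySem.Set.update s (PySem.Dict.getD (PySem.Dict.mk split_op) "variables" [])) PySem.Set.empty
  !(PySem.Set.inter (PySem.Set.ofList (PySem.Dict.getD (PySem.Dict.mk operation) "source_vars" [])) all_split_vars).isEmpty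

-- ===== PRECONDITION & SPEC =====
def Spec_affects_split_data_py (operation : List (String × List String)) (split_operations : List (List (String × List String))) (out : Bool) : Prop := out = affects_split_data_py_alt operation split_operations
instance (operation : List (String × List String)) (split_operations : List (List (String × List String))) (out : Bool) : Decidable (Spec_affects_split_data_py operation split_operations out) := by unfold Spec_affects_split_data_py; infer_instance

-- ===== CLAIM (what is proved, stated in full; the proofs are below) =====
def Claim_equal_affects_split_data_py : Prop := ∀ (operation : List (String × List String)) (split_operations : List (List (String × List String))), Dom_affects_split_data_py operation split_operations → Spec_affects_split_data_py operation split_operations (affects_split_data_py operation split_operations)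

-- ===== LEMMAS AND PROOFS =====

lemma inter_ne_nil_iff (s t : PySem.Set String) :
    PySem.Set.inter s t ≠ [] ↔ ∃ x, x ∈ s ∧ x ∈ t := by
  rw [← List.isEmpty_eq_false_iff, List.isEmpty_eq_false_iff_exists_mem]
  constructor
  · rintro ⟨x, hx⟩
    exact ⟨x, (PySem.Set.mem_inter s t x).1 hx⟩
  · rintro ⟨x, hx⟩
    exact ⟨x, (PySem.Set.mem_inter s t x).2 hx⟩

lemma loopA_eq_true_iff (ov : PySem.Set String) (sos : List (List (String × List String))) :
    pvLoopA ov sos = true ↔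
      ∃ so ∈ sos, ∃ x, x ∈ ov ∧ x ∈ PySem.Dict.getD (PySem.Dict.mk so) "variables" [] := by
  induction sos with
  | nil => simp [pvLoopA]
  | cons so rest ih =>
    simp only [pvLoopA]
    split_ifs with h
    · simp only [true_iff]
      obtain ⟨x, hx1, hx2⟩ := (inter_ne_nil_iff _ _).1 h
      exact ⟨so, by simp, x, hx1, (PySem.Set.mem_ofList _ _).1 hx2⟩
    · rw [ih]
      constructor
      · rintro ⟨so', h1, hx⟩
        exact ⟨so', by simp [h1], hx⟩
      · rintro ⟨so', h1, x, hx1, hx2⟩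
        rcases List.mem_cons.1 h1 with rfl | h1
        · exact absurd ((inter_ne_nil_iff _ _).2 ⟨x, hx1, (PySem.Set.mem_ofList _ _).2 hx2⟩) (by simpa using h)
        · exact ⟨so', h1, x, hx1, hx2⟩

lemma mem_fold_update (sos : List (List (String × List String))) (s : PySem.Set String) (x : String) :
    x ∈ sos.foldl (fun s split_op => PySem.Set.update s (PySem.Dict.getD (PySem.Dict.mk split_op) "variables" [])) s ↔
      x ∈ s ∨ ∃ so ∈ sos, x ∈ PySem.Dict.getD (PySem.Dict.mk so) "variables" [] := by
  induction sos generalizing s with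
  | nil => simp
  | cons so rest ih =>
    simp only [List.foldl_cons, ih, PySem.Set.mem_update]
    constructor
    · rintro (⟨h | h⟩ | ⟨so', h1, h2⟩)
      · exact Or.inl h
      · exact Or.inr ⟨so, by simp, h⟩
      · exact Or.inr ⟨so', by simp [h1], h2⟩
    · rintro (h | ⟨so', h1, h2⟩)
      · exact Or.inl (Or.inl h)
      · rcases List.mem_cons.1 h1 with rfl | h1
        · exact Or.inl (Or.inr h2)
        · exact Or.inr ⟨so', h1, h2⟩

-- ===== VERDICT (by name: the statement is the Claim_ definition above) =====
theorem affects_split_data_py_spec : Claim_equal_affects_split_data_py := by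
  intro operation split_operations _
  unfold Spec_affects_split_data_py affects_split_data_py affects_split_data_py_alt
  simp only []
  rw [Bool.eq_iff_iff]
  rw [loopA_eq_true_iff]
  rw [Bool.not_eq_eq_eq_not, Bool.not_true, List.isEmpty_eq_false_iff_exists_mem]
  constructor
  · rintro ⟨so, h1, x, hx1, hx2⟩
    refine ⟨x, (PySem.Set.mem_inter _ _ x).2 ⟨hx1, ?_⟩⟩
    exact (mem_fold_update _ _ _).2 (Or.inr ⟨so, h1, hx2⟩)
  · rintro ⟨x, hx⟩
    obtain ⟨hx1, hx2⟩ := (PySem.Set.mem_inter _ _ x).1 hx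
    rcases (mem_fold_update _ _ _).1 hx2 with h | ⟨so, h1, h2⟩
    · simp [PySem.Set.empty] at h
    · exact ⟨so, h1, x, hx1, h2⟩
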